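-- pv_equiv track=rewrite | github.com/ROWELLI/PPS_24_Winter | onyu/A049_4659.py | three_times
-- ===== SOURCE A (Python) =====
-- def three_times(a):
--     vowels = "aeiou"
--     check = 0
--     count = 0
--     for i in range(len(a)):
--         if a[i] == 'a' or a[i] == 'e' or a[i] == 'i' or a[i] == 'o' or a[i] == 'u' :
--             count += 1
--             check = 0
--         else:
--             check += 1
--             count = 0
--         if check == 3 or count == 3:
--             return 0
--     return 1
-- ===== SOURCE B (Python) =====
-- def three_times(a):
--     vowels = "aeiou"
--     for i in range(len(a) - 2):
--         if (a[i] in vowels) == (a[i+1] in vowels) == (a[i+2] in vowels):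
--             return 0
--     return 1
-- ===== Notes on version B (the rewrite author's own statement) =====
-- stated objective: simpler
-- what changed: Replaced the dual run-length counters (check/count with early exit at 3) by a direct sliding-window scan that returns 0 as soon as three consecutive characters have the same vowel/non-vowel class.
import Mathlib
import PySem

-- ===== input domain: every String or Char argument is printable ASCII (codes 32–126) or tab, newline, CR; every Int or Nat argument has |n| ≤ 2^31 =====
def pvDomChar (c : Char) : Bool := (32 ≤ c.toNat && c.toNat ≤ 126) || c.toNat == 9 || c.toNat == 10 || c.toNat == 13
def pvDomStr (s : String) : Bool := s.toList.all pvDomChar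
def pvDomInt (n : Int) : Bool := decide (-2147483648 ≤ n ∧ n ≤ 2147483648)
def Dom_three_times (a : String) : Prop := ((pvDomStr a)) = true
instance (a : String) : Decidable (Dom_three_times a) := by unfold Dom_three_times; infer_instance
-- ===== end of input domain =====

-- B replaces A's dual run-length counters with a direct sliding-window scan over
-- each three consecutive characters (objective: simpler).

-- ===== PORT A =====
-- A's vowel test: a[i] == 'a' or a[i] == 'e' or ...
def pvIsVA (c : Char) : Bool := c == 'a' || c == 'e' || c == 'i' || c == 'o' || c == 'u'

-- A's loop over the characters, carrying the two counters `check` and `count`.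
def pvLoopA (check count : Int) : List Char → Int
  | [] => 1
  | c :: rest =>
    let check' := if pvIsVA c then 0 else check + 1
    let count' := if pvIsVA c then count + 1 else 0
    if check' = 3 ∨ count' = 3 then 0 else pvLoopA check' count' rest

def three_times (a : String) : Int := pvLoopA 0 0 a.toList

-- ===== PORT B =====
-- B's vowel test: membership `c in "aeiou"`.
def pvIsVB (c : Char) : Bool := ("aeiou".toList).contains c

-- B's sliding window: check each three consecutive characters.
def pvLoopB : List Char → Int
  | x :: y :: z :: rest =>
    if pvIsVB x = pvIsVB y ∧ pvIsVB y = pvIsVB z then 0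
    else pvLoopB (y :: z :: rest)
  | _ => 1

def three_times_alt (a : String) : Int := pvLoopB a.toList

-- ===== PRECONDITION & SPEC =====
def Spec_three_times (a : String) (out : Int) : Prop := out = three_times_alt a
instance (a : String) (out : Int) : Decidable (Spec_three_times a out) := by unfold Spec_three_times; infer_instance

-- ===== CLAIM (what is proved, stated in full; the proofs are below) =====
def Claim_equal_three_times : Prop := ∀ (a : String), Dom_three_times a → Spec_three_times a (three_times a)

-- ===== LEMMAS AND PROOFS =====

theorem pvVowels_toList : "aeiou".toList = ['a', 'e', 'i', 'o', 'u'] := by decide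

theorem pvIsV_eq (c : Char) : pvIsVB c = pvIsVA c := by
  unfold pvIsVB pvIsVA
  rw [pvVowels_toList]
  cases h1 : c == 'a' <;> cases h2 : c == 'e' <;> cases h3 : c == 'i' <;>
    cases h4 : c == 'o' <;> cases h5 : c == 'u' <;>
    simp [List.contains, List.elem, h1, h2, h3, h4, h5]

-- the run-of-one state A's loop carries after reading one char of class b
def pvSt (b : Bool) : Int × Int := if b then (0, 1) else (1, 0)

theorem pvLoopB_skip (y z : Char) (rest : List Char) (h : pvIsVB y ≠ pvIsVB z) :
    pvLoopB (y :: z :: rest) = pvLoopB (z :: rest) := by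
  cases rest with
  | nil => simp [pvLoopB]
  | cons r rest' => simp only [pvLoopB]; rw [if_neg]; rintro ⟨h1, _⟩; exact h h1

theorem pvLoop_eq (n : Nat) : ∀ l : List Char, l.length ≤ n → ∀ x : Char,
    pvLoopA (pvSt (pvIsVA x)).1 (pvSt (pvIsVA x)).2 l = pvLoopB (x :: l) := by
  induction n with
  | zero =>
    intro l hl x
    have : l = [] := List.eq_nil_of_length_eq_zero (Nat.le_zero.mp hl)
    subst this
    cases hx : pvIsVA x <;> simp [pvLoopA, pvLoopB]
  | succ n IH =>
    intro l hl x
    match l with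
    | [] => cases hx : pvIsVA x <;> simp [pvLoopA, pvLoopB]
    | [y] =>
      cases hx : pvIsVA x <;> cases hy : pvIsVA y <;>
        simp [pvSt, pvLoopA, pvLoopB, hy]
    | y :: z :: rest =>
      have hlen1 : (z :: rest).length ≤ n := by
        simpa using Nat.le_of_succ_le_succ hl
      have hlen2 : rest.length ≤ n := Nat.le_of_succ_le (by simpa using hlen1)
      by_cases hxy : pvIsVA x = pvIsVA y
      · by_cases hyz : pvIsVA y = pvIsVA z
        · -- window fires: both return 0
          cases hx : pvIsVA x <;>
            simp_all [pvSt, pvLoopA, pvLoopB, pvIsV_eq]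
        · -- x,y same class, z different: advance two steps on the left,
          -- drop the dead windows on the right
          have hB : pvLoopB (x :: y :: z :: rest) = pvLoopB (z :: rest) := by
            rw [show pvLoopB (x :: y :: z :: rest) = pvLoopB (y :: z :: rest) by
                  simp only [pvLoopB]; rw [if_neg]; rintro ⟨_, h2⟩
                  exact hyz (by rw [← pvIsV_eq, ← pvIsV_eq, h2])]
            exact pvLoopB_skip y z rest (by rw [pvIsV_eq, pvIsV_eq]; exact hyz)
          rw [hB, ← IH rest hlen2 z]
          cases hx : pvIsVA x <;> cases hz : pvIsVA z <;>
            simp_all [pvSt, pvLoopA]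
      · -- x and y differ in class: one step on the left, window dead on the right
        have hB : pvLoopB (x :: y :: z :: rest) = pvLoopB (y :: z :: rest) := by
          simp only [pvLoopB]; rw [if_neg]; rintro ⟨h1, _⟩
          exact hxy (by rw [← pvIsV_eq, ← pvIsV_eq, h1])
        rw [hB, ← IH (z :: rest) hlen1 y]
        cases hx : pvIsVA x <;> cases hy : pvIsVA y <;>
          simp_all [pvSt, pvLoopA]

theorem pvMain (l : List Char) : pvLoopA 0 0 l = pvLoopB l := by
  cases l with
  | nil => simp [pvLoopA, pvLoopB]
  | cons x t =>
    have := pvLoop_eq t.length t (Nat.le_refl _) x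
    cases hx : pvIsVA x <;> simp_all [pvSt, pvLoopA]

-- ===== VERDICT (by name: the statement is the Claim_ definition above) =====
theorem three_times_spec : Claim_equal_three_times := by
  intro a _
  unfold Spec_three_times three_times three_times_alt
  exact pvMain a.toList
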